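-- pv_equiv track=rewrite | github.com/LocalLibrarian/EZ-Sharp-Compiler | TACGenerator.py | findIDLiteralIndex
-- ===== SOURCE A (Python) =====
-- IDENTIFIER = 'identifier'
--
-- INTEGER = "integer"
--
-- DOUBLE = "double"
--
-- def findIDLiteralIndex(tokens: list[list[str]]) -> tuple[int, int]:
--     index1 = -1
--     index2 = -1
--     for x in range(len(tokens)):
--         if tokens[x][0] in [IDENTIFIER, INTEGER, DOUBLE]:
--             if index1 == -1: index1 = x
--             else: index2 = x
--     return (index1, index2)
-- ===== SOURCE B (Python) =====
-- IDENTIFIER = 'identifier'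
--
-- INTEGER = "integer"
--
-- DOUBLE = "double"
--
-- def findIDLiteralIndex(tokens: list[list[str]]) -> tuple[int, int]:
--     kinds = (IDENTIFIER, INTEGER, DOUBLE)
--     first = -1
--     for i, t in enumerate(tokens):
--         if t[0] in kinds:
--             first = i
--             break
--     if first == -1:
--         return (-1, -1)
--     i = len(tokens) - 1
--     for t in reversed(tokens):
--         if i == first:
--             break
--         if t[0] in kinds:
--             return (first, i)
--         i -= 1
--     return (first, -1)
-- ===== Notes on version B (the rewrite author's own statement) =====
-- stated objective: alternative
-- what changed: replaces A's single pass with two running accumulators and a first/else branch by an early-exit forward scan for the first matching index plus a backward scan (over the reversed list) for the last one, with constant-shape result assembly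
import Mathlib
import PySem

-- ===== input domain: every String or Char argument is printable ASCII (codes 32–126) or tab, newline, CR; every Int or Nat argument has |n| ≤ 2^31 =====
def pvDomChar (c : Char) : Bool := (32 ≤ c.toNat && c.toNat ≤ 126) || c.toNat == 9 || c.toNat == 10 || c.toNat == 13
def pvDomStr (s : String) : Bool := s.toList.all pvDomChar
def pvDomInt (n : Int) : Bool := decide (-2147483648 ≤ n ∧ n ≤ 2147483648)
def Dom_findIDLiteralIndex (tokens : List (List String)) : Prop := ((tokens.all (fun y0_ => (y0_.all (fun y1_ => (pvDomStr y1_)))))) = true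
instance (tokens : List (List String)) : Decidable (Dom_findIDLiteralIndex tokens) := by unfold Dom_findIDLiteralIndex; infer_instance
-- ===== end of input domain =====

-- B replaces A's single pass with two accumulators by an early-exit forward scan for the
-- first match and a backward scan over the reversed list for the last one (objective: alternative).

-- shared membership test: tok[0] in [IDENTIFIER, INTEGER, DOUBLE]; PySem.List.pyGet? none (empty token,
-- a Python IndexError) is treated as a miss — such inputs are excluded by Pre_ below
def pvIsIDLit (t : List String) : Bool :=
  match PySem.List.pyGet? t 0 with
  | some s => s == "identifier" || s == "integer" || s == "double"
  | none => false

-- ===== PORT A =====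
-- for x in range(len(tokens)): tokens[x] via pyGetD (x always in range)
def findIDLiteralIndex (tokens : List (List String)) : Int × Int :=
  (PySem.List.pyRange 0 (PySem.List.len tokens) 1).foldl
    (fun st x =>
      if pvIsIDLit (PySem.List.pyGetD tokens x []) then
        (if st.1 = -1 then (x, st.2) else (st.1, x))
      else st)
    (-1, -1)

-- ===== PORT B =====
-- forward scan with early exit: index of the first match, -1 if none
def pvFirstIdx : List (List String) → Int → Int
  | [], _ => -1
  | t :: rest, i => if pvIsIDLit t then i else pvFirstIdx rest (i + 1)

-- backward scan over the reversed list, i counting down; stops at `first`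
def pvLastFromRev : List (List String) → Int → Int → Int
  | [], _, _ => -1
  | t :: rest, i, first =>
      if i = first then -1
      else if pvIsIDLit t then i
      else pvLastFromRev rest (i - 1) first

def findIDLiteralIndex_alt (tokens : List (List String)) : Int × Int :=
  let first := pvFirstIdx tokens 0
  if first = -1 then (-1, -1)
  else (first, pvLastFromRev tokens.reverse ((tokens.length : Int) - 1) first)

-- ===== PRECONDITION & SPEC =====
-- Pre_ excludes inputs containing an empty token list, on which Python A raises IndexError (tokens[x][0]).
def Pre_findIDLiteralIndex (tokens : List (List String)) : Prop :=
  ∀ t ∈ tokens, t ≠ []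
instance (tokens : List (List String)) : Decidable (Pre_findIDLiteralIndex tokens) := by
  unfold Pre_findIDLiteralIndex; infer_instance

def pvWitness_findIDLiteralIndex : List (List String) :=
  [["identifier", "x"], ["plus"], ["integer", "3"]]

def Spec_findIDLiteralIndex (tokens : List (List String)) (out : Int × Int) : Prop := out = findIDLiteralIndex_alt tokens
instance (tokens : List (List String)) (out : Int × Int) : Decidable (Spec_findIDLiteralIndex tokens out) := by unfold Spec_findIDLiteralIndex; infer_instance

-- ===== CLAIM (what is proved, stated in full; the proofs are below) =====
def Claim_equal_findIDLiteralIndex : Prop := ∀ (tokens : List (List String)), Dom_findIDLiteralIndex tokens → Pre_findIDLiteralIndex tokens → Spec_findIDLiteralIndex tokens (findIDLiteralIndex tokens)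

-- ===== LEMMAS AND PROOFS =====

-- A's loop body on an (index, token) pair
def pvStepA (st : Int × Int) (p : Int × List String) : Int × Int :=
  if pvIsIDLit p.2 then (if st.1 = -1 then (p.1, st.2) else (st.1, p.1)) else st

-- last matching index of tokens numbered from s, default d
def pvLastAux : List (List String) → Int → Int → Int
  | [], _, d => d
  | t :: r, s, d => pvLastAux r (s + 1) (if pvIsIDLit t then s else d)

-- B generalized to an arbitrary start index
def pvBGen (tokens : List (List String)) (s : Int) : Int × Int :=
  let f := pvFirstIdx tokens s
  if f = -1 then (-1, -1)
  else (f, pvLastFromRev tokens.reverse (s + tokens.length - 1) f)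

theorem pvA_enum (tokens : List (List String)) :
    findIDLiteralIndex tokens = (PySem.List.enumerate tokens 0).foldl pvStepA (-1, -1) := by
  rw [PySem.List.enumerate_eq_map_pyRange (d := ([] : List String)), List.foldl_map]
  rfl

theorem pvLastAux_append (l : List (List String)) (x : List String) (s d : Int) :
    pvLastAux (l ++ [x]) s d = if pvIsIDLit x then s + l.length else pvLastAux l s d := by
  induction l generalizing s d with
  | nil => simp [pvLastAux]
  | cons t r ih =>
      simp only [List.cons_append, pvLastAux, ih, List.length_cons]
      split_ifs <;> push_cast <;> ring

theorem pvLastRev_append_miss (t : List String) (h : pvIsIDLit t = false) :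
    ∀ (l : List (List String)) (i f : Int), pvLastFromRev (l ++ [t]) i f = pvLastFromRev l i f := by
  intro l
  induction l with
  | nil => intro i f; simp [pvLastFromRev, h]
  | cons x r ih =>
      intro i f
      simp only [List.cons_append, pvLastFromRev, ih]

theorem pvLemL (r : List (List String)) (s : Int) (t0 : List String) (tail : List (List String)) :
    pvLastFromRev (r.reverse ++ t0 :: tail) (s + r.length) s = pvLastAux r (s + 1) (-1) := by
  induction r using List.reverseRecOn with
  | nil => simp [pvLastFromRev, pvLastAux]
  | append_singleton r' x ih =>
      rw [pvLastAux_append]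
      simp only [List.reverse_append, List.reverse_singleton, List.cons_append,
        List.nil_append, pvLastFromRev, List.length_append, List.length_singleton]
      push_cast
      rw [if_neg (by omega : ¬ (s + ((r'.length : Int) + 1) = s))]
      by_cases hx : pvIsIDLit x
      · rw [if_pos hx, if_pos hx]
        ring
      · rw [if_neg hx, if_neg hx]
        rw [show s + ((r'.length : Int) + 1) - 1 = s + r'.length from by ring, ih]

theorem pvA2 (tokens : List (List String)) :
    ∀ (s a b : Int), a ≠ -1 →
      (PySem.List.enumerate tokens s).foldl pvStepA (a, b) = (a, pvLastAux tokens s b) := by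
  induction tokens with
  | nil => intro s a b _; simp [pvLastAux, PySem.List.enumerate_nil]
  | cons t r ih =>
      intro s a b ha
      rw [PySem.List.enumerate_cons]
      simp only [List.foldl_cons, pvStepA, pvLastAux]
      by_cases ht : pvIsIDLit t
      · simp only [ht, if_true, if_neg ha]
        exact ih (s + 1) a s ha
      · simp only [ht, if_false, Bool.false_eq_true]
        exact ih (s + 1) a b ha

theorem pvMainAB (tokens : List (List String)) :
    ∀ (s : Int), 0 ≤ s →
      (PySem.List.enumerate tokens s).foldl pvStepA (-1, -1) = pvBGen tokens s := by
  induction tokens with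
  | nil => intro s _; simp [pvBGen, pvFirstIdx, PySem.List.enumerate_nil]
  | cons t r ih =>
      intro s hs
      have hsne : s ≠ -1 := by omega
      rw [PySem.List.enumerate_cons]
      simp only [List.foldl_cons, pvStepA]
      by_cases ht : pvIsIDLit t
      · simp only [ht, if_true]
        rw [pvA2 r (s + 1) s (-1) hsne]
        simp only [pvBGen, pvFirstIdx, ht, if_true, if_neg hsne, List.reverse_cons,
          List.length_cons]
        push_cast
        rw [show s + ((r.length : Int) + 1) - 1 = s + r.length from by ring, pvLemL r s t []]
      · simp only [ht, if_false, Bool.false_eq_true]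
        rw [ih (s + 1) (by omega)]
        simp only [pvBGen, pvFirstIdx, ht, if_false, Bool.false_eq_true, List.reverse_cons,
          List.length_cons]
        by_cases hf : pvFirstIdx r (s + 1) = -1
        · simp [hf]
        · simp only [hf, if_false]
          rw [pvLastRev_append_miss t (by simpa using ht)]
          push_cast
          rw [show s + ((r.length : Int) + 1) - 1 = s + 1 + r.length - 1 from by ring]

-- ===== VERDICT (by name: the statement is the Claim_ definition above) =====
theorem findIDLiteralIndex_spec : Claim_equal_findIDLiteralIndex := by
  intro tokens _ _
  unfold Spec_findIDLiteralIndex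
  rw [pvA_enum, pvMainAB tokens 0 le_rfl]
  simp [pvBGen, findIDLiteralIndex_alt]
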